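-- pv_equiv track=rewrite | github.com/rayantr06/ramypulse | tests/test_chat_page.py | _select_display_sources
-- ===== SOURCE A (Python) =====
-- def _select_display_sources(chunks: list[dict], response: dict) -> list[dict]:
--     """Sélection des sources à afficher sous la réponse."""
--     cited_sources = response.get("sources") or []
--     if not cited_sources:
--         return chunks
--     matched = []
--     for source in cited_sources:
--         for chunk in chunks:
--             same_url = source.get("url", "") == chunk.get("url", "")
--             same_channel = source.get("channel", "") == chunk.get("channel", "")
--             same_timestamp = source.get("timestamp", "") == chunk.get("timestamp", "")
--             if same_channel and (same_url or same_timestamp):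
--                 matched.append(chunk)
--                 break
--     return matched or chunks
-- ===== SOURCE B (Python) =====
-- def _select_display_sources(chunks: list[dict], response: dict) -> list[dict]:
--     """Sélection des sources à afficher sous la réponse (index-based)."""
--     cited_sources = response.get("sources") or []
--     if not cited_sources:
--         return chunks
--     by_url = {}
--     by_ts = {}
--     for i, chunk in enumerate(chunks):
--         by_url.setdefault((chunk.get("channel", ""), chunk.get("url", "")), (i, chunk))
--         by_ts.setdefault((chunk.get("channel", ""), chunk.get("timestamp", "")), (i, chunk))
--     matched = []
--     for source in cited_sources:
--         c = source.get("channel", "")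
--         pu = by_url.get((c, source.get("url", "")))
--         pt = by_ts.get((c, source.get("timestamp", "")))
--         if pu is None:
--             best = pt
--         elif pt is None or pu[0] <= pt[0]:
--             best = pu
--         else:
--             best = pt
--         if best is not None:
--             matched.append(best[1])
--     return matched or chunks
-- ===== Notes on version B (the rewrite author's own statement) =====
-- stated objective: alternative
-- what changed: Instead of re-scanning all chunks for every cited source, B builds two dictionaries in one pass over the chunks (earliest (index, chunk) keyed by (channel,url) and by (channel,timestamp)) and answers each source with two constant-time lookups, keeping the hit with the smaller index; it trades the per-source scan for an up-front index build.
import Mathlib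
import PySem

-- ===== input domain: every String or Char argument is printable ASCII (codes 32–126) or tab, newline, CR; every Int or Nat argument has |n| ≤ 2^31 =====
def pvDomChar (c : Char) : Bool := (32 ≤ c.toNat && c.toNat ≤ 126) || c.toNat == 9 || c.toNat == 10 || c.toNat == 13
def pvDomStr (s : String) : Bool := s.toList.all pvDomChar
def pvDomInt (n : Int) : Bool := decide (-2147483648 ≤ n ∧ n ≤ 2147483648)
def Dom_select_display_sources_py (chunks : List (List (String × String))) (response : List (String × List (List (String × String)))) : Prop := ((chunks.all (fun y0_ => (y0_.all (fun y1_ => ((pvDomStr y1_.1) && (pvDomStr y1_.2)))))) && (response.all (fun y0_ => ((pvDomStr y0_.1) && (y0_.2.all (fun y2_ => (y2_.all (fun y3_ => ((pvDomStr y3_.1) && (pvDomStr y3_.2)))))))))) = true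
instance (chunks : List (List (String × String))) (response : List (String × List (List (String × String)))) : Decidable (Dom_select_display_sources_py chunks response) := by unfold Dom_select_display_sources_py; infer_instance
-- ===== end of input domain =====

-- B replaces A's per-source scan over the chunks with two dictionaries built once over the chunks
-- (earliest (index, chunk) by (channel,url) and by (channel,timestamp)), then one lookup pair per
-- cited source, keeping the earlier hit; objective: alternative (index lookups instead of an inner scan).


-- ===== PORT A =====
-- d.get(k, "") on a str→str dict (assoc list, first match); shared primitive of both ports
def getS (d : List (String × String)) (k : String) : String := (List.lookup k d).getD ""

-- the body of A's inner `for chunk in chunks:` loop (the three comparisons and the combined test)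
def condA (s ch : List (String × String)) : Bool :=
  let same_url := getS s "url" == getS ch "url"
  let same_channel := getS s "channel" == getS ch "channel"
  let same_timestamp := getS s "timestamp" == getS ch "timestamp"
  same_channel && (same_url || same_timestamp)

-- A's inner loop with `break`: first chunk matching the source, if any
def findChunkA (s : List (String × String)) : List (List (String × String)) → Option (List (String × String))
  | [] => none
  | ch :: rest => if condA s ch then some ch else findChunkA s rest

-- A's outer loop accumulating `matched`
def matchedA (chunks : List (List (String × String))) (cited : List (List (String × String))) : List (List (String × String)) :=
  cited.foldl (fun acc s =>
    match findChunkA s chunks with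
    | some c => acc ++ [c]
    | none => acc) []

def select_display_sources_py (chunks : List (List (String × String))) (response : List (String × List (List (String × String)))) : List (List (String × String)) :=
  let cited := (List.lookup "sources" response).getD []
  if cited.isEmpty then chunks
  else if (matchedA chunks cited).isEmpty then chunks
  else matchedA chunks cited

-- ===== PORT B =====
def keyB (field : String) (ch : List (String × String)) : String × String :=
  (getS ch "channel", getS ch field)

-- B's single pass over enumerate(chunks): setdefault into both indexes
def buildIdx : List (List (String × String)) → Nat →
    PySem.Dict (String × String) (Nat × List (String × String)) →
    PySem.Dict (String × String) (Nat × List (String × String)) →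
    PySem.Dict (String × String) (Nat × List (String × String)) ×
    PySem.Dict (String × String) (Nat × List (String × String))
  | [], _, du, dt => (du, dt)
  | ch :: rest, i, du, dt =>
      buildIdx rest (i + 1)
        (du.setdefault (keyB "url" ch) (i, ch))
        (dt.setdefault (keyB "timestamp" ch) (i, ch))

-- B's if/elif/else choosing the earlier of the two hits
def combineB (pu pt : Option (Nat × List (String × String))) : Option (Nat × List (String × String)) :=
  match pu with
  | none => pt
  | some pu => match pt with
    | none => some pu
    | some pt => if pu.1 ≤ pt.1 then some pu else some pt

-- per-source: one lookup in each index, combined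
def bestB (du dt : PySem.Dict (String × String) (Nat × List (String × String)))
    (s : List (String × String)) : Option (Nat × List (String × String)) :=
  combineB (du.get? (getS s "channel", getS s "url"))
           (dt.get? (getS s "channel", getS s "timestamp"))

-- B's loop over the cited sources
def matchedB (du dt : PySem.Dict (String × String) (Nat × List (String × String)))
    (cited : List (List (String × String))) : List (List (String × String)) :=
  cited.foldl (fun acc s =>
    match bestB du dt s with
    | some b => acc ++ [b.2]
    | none => acc) []

def select_display_sources_py_alt (chunks : List (List (String × String))) (response : List (String × List (List (String × String)))) : List (List (String × String)) :=
  let cited := (List.lookup "sources" response).getD []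
  if cited.isEmpty then chunks
  else
    let p := buildIdx chunks 0 PySem.Dict.empty PySem.Dict.empty
    if (matchedB p.1 p.2 cited).isEmpty then chunks
    else matchedB p.1 p.2 cited

-- ===== PRECONDITION & SPEC =====
def Spec_select_display_sources_py (chunks : List (List (String × String))) (response : List (String × List (List (String × String)))) (out : List (List (String × String))) : Prop := out = select_display_sources_py_alt chunks response
instance (chunks : List (List (String × String))) (response : List (String × List (List (String × String)))) (out : List (List (String × String))) : Decidable (Spec_select_display_sources_py chunks response out) := by unfold Spec_select_display_sources_py; infer_instance

-- ===== CLAIM (what is proved, stated in full; the proofs are below) =====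
def Claim_equal_select_display_sources_py : Prop := ∀ (chunks : List (List (String × String))) (response : List (String × List (List (String × String)))), Dom_select_display_sources_py chunks response → Spec_select_display_sources_py chunks response (select_display_sources_py chunks response)

-- ===== LEMMAS AND PROOFS =====

-- first (index, chunk) whose key for `field` equals k, scanning from offset i
def firstIdx (field : String) (k : String × String) : List (List (String × String)) → Nat → Option (Nat × List (String × String))
  | [], _ => none
  | ch :: rest, i => if keyB field ch == k then some (i, ch) else firstIdx field k rest (i + 1)

-- first (index, chunk) satisfying A's predicate, scanning from offset i
def firstPair (s : List (String × String)) : List (List (String × String)) → Nat → Option (Nat × List (String × String))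
  | [], _ => none
  | ch :: rest, i => if condA s ch then some (i, ch) else firstPair s rest (i + 1)

theorem firstIdx_ge (field : String) (k : String × String) :
    ∀ (l : List (List (String × String))) (i : Nat) (p : Nat × List (String × String)),
      firstIdx field k l i = some p → i ≤ p.1 := by
  intro l
  induction l with
  | nil => intro i p h; simp [firstIdx] at h
  | cons ch rest ih =>
    intro i p h
    simp only [firstIdx] at h
    split at h
    · cases h; simp
    · exact Nat.le_of_succ_le (ih (i + 1) p h)

theorem buildIdx_fst_get? (k : String × String) :
    ∀ (l : List (List (String × String))) (i : Nat)
      (du dt : PySem.Dict (String × String) (Nat × List (String × String))),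
      (buildIdx l i du dt).1.get? k = (du.get? k).or (firstIdx "url" k l i) := by
  intro l
  induction l with
  | nil =>
    intro i du dt
    simp only [buildIdx, firstIdx]
    cases du.get? k <;> rfl
  | cons ch rest ih =>
    intro i du dt
    simp only [buildIdx, firstIdx]
    rw [ih]
    by_cases hk : keyB "url" ch = k
    · subst hk
      rw [PySem.Dict.get?_setdefault_self]
      cases du.get? (keyB "url" ch) <;> simp [Option.or]
    · have hne : k ≠ keyB "url" ch := fun h => hk h.symm
      rw [PySem.Dict.get?_setdefault_of_ne _ _ hne]
      have hbeq : (keyB "url" ch == k) = false := by simpa using hk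
      simp [hbeq]

theorem buildIdx_snd_get? (k : String × String) :
    ∀ (l : List (List (String × String))) (i : Nat)
      (du dt : PySem.Dict (String × String) (Nat × List (String × String))),
      (buildIdx l i du dt).2.get? k = (dt.get? k).or (firstIdx "timestamp" k l i) := by
  intro l
  induction l with
  | nil =>
    intro i du dt
    simp only [buildIdx, firstIdx]
    cases dt.get? k <;> rfl
  | cons ch rest ih =>
    intro i du dt
    simp only [buildIdx, firstIdx]
    rw [ih]
    by_cases hk : keyB "timestamp" ch = k
    · subst hk
      rw [PySem.Dict.get?_setdefault_self]
      cases dt.get? (keyB "timestamp" ch) <;> simp [Option.or]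
    · have hne : k ≠ keyB "timestamp" ch := fun h => hk h.symm
      rw [PySem.Dict.get?_setdefault_of_ne _ _ hne]
      have hbeq : (keyB "timestamp" ch == k) = false := by simpa using hk
      simp [hbeq]

theorem condA_eq_keys (s ch : List (String × String)) :
    condA s ch = ((keyB "url" ch == (getS s "channel", getS s "url")) ||
                  (keyB "timestamp" ch == (getS s "channel", getS s "timestamp"))) := by
  have hp : ∀ (a b c d : String), ((a, b) == (c, d)) = (a == c && b == d) := fun _ _ _ _ => rfl
  simp only [condA, keyB, hp]
  rw [Bool.eq_iff_iff]
  simp only [Bool.and_eq_true, Bool.or_eq_true, beq_iff_eq]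
  constructor
  · rintro ⟨hc, hu | ht⟩
    · exact Or.inl ⟨hc.symm, hu.symm⟩
    · exact Or.inr ⟨hc.symm, ht.symm⟩
  · rintro (⟨hc, hu⟩ | ⟨hc, ht⟩)
    · exact ⟨hc.symm, Or.inl hu.symm⟩
    · exact ⟨hc.symm, Or.inr ht.symm⟩

theorem combine_firstIdx (s : List (String × String)) :
    ∀ (l : List (List (String × String))) (i : Nat),
      combineB (firstIdx "url" (getS s "channel", getS s "url") l i)
               (firstIdx "timestamp" (getS s "channel", getS s "timestamp") l i) =
        firstPair s l i := by
  intro l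
  induction l with
  | nil => intro i; simp [firstIdx, firstPair, combineB]
  | cons ch rest ih =>
    intro i
    simp only [firstIdx, firstPair]
    rw [condA_eq_keys s ch]
    cases hU : (keyB "url" ch == (getS s "channel", getS s "url")) with
    | false =>
      cases hT : (keyB "timestamp" ch == (getS s "channel", getS s "timestamp")) with
      | false =>
        simp only [Bool.or_self, Bool.false_eq_true, if_false]
        exact ih (i + 1)
      | true =>
        cases ha : firstIdx "url" (getS s "channel", getS s "url") rest (i + 1) with
        | none => simp [combineB]
        | some pu =>
          have hge := firstIdx_ge "url" _ rest (i + 1) pu ha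
          have hnle : ¬ pu.1 ≤ i := by omega
          simp [combineB, hnle]
    | true =>
      cases hT : (keyB "timestamp" ch == (getS s "channel", getS s "timestamp")) with
      | false =>
        cases hb : firstIdx "timestamp" (getS s "channel", getS s "timestamp") rest (i + 1) with
        | none => simp [combineB]
        | some pt =>
          have hge := firstIdx_ge "timestamp" _ rest (i + 1) pt hb
          have hle : i ≤ pt.1 := by omega
          simp [combineB, hle]
      | true => simp [combineB]

theorem findChunkA_eq_firstPair (s : List (String × String)) :
    ∀ (l : List (List (String × String))) (i : Nat),
      findChunkA s l = (firstPair s l i).map Prod.snd := by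
  intro l
  induction l with
  | nil => intro i; simp [findChunkA, firstPair]
  | cons ch rest ih =>
    intro i
    simp only [findChunkA, firstPair]
    split
    · rfl
    · exact ih (i + 1)

theorem bestB_eq (chunks : List (List (String × String))) (s : List (String × String)) :
    bestB (buildIdx chunks 0 PySem.Dict.empty PySem.Dict.empty).1
          (buildIdx chunks 0 PySem.Dict.empty PySem.Dict.empty).2 s =
      firstPair s chunks 0 := by
  unfold bestB
  rw [buildIdx_fst_get?, buildIdx_snd_get?]
  simp only [PySem.Dict.get?_empty]
  exact combine_firstIdx s chunks 0

theorem matched_eq (chunks cited : List (List (String × String))) :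
    matchedA chunks cited =
      matchedB (buildIdx chunks 0 PySem.Dict.empty PySem.Dict.empty).1
               (buildIdx chunks 0 PySem.Dict.empty PySem.Dict.empty).2 cited := by
  unfold matchedA matchedB
  congr 1
  funext acc s
  rw [bestB_eq, findChunkA_eq_firstPair s chunks 0]
  cases firstPair s chunks 0 <;> rfl

-- ===== VERDICT (by name: the statement is the Claim_ definition above) =====
theorem select_display_sources_py_spec : Claim_equal_select_display_sources_py := by
  intro chunks response _
  unfold Spec_select_display_sources_py
  simp only [select_display_sources_py, select_display_sources_py_alt]
  rw [matched_eq chunks ((List.lookup "sources" response).getD [])]
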